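-- pv_equiv track=rewrite | github.com/gustopn/autodnssec | zonefilemod.py | __analyze_soa_rec
-- ===== SOURCE A (Python) =====
-- def __analyze_soa_rec(record_content):
--   result_list = []
--   record_parts_list = record_content.partition(";")
--   record_part_line_counter = 0
--   for record_part_line in record_parts_list[0].split("\n"):
--     if record_part_line_counter > 0:
--       result_list.append( ( "\n", True ) )
--     result_list.append( ( record_part_line, True ) )
--     record_part_line_counter += 1
--   if record_parts_list[1]:
--     record_comment_part = record_parts_list[2].partition("\n")
--     result_list.append( ( record_parts_list[1] + record_comment_part[0], False ) )
--     if record_comment_part[1]: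
--       result_list.append( ( record_comment_part[1], True ) )
--     if record_comment_part[2]:
--       result_list += __analyze_soa_rec(record_comment_part[2])
--   return result_list
-- ===== SOURCE B (Python) =====
-- def __analyze_soa_rec(record_content):
--   result = []
--   cur = []
--   in_comment = False
--   fresh = False
--   for ch in record_content:
--     if in_comment:
--       if ch == "\n":
--         result.append(("".join(cur), False))
--         result.append(("\n", True))
--         cur = []
--         in_comment = False
--         fresh = True
--       else:
--         cur.append(ch)
--     else:
--       fresh = False
--       if ch == ";":
--         result.append(("".join(cur), True))
--         cur = [ch]
--         in_comment = True
--       elif ch == "\n":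
--         result.append(("".join(cur), True))
--         result.append(("\n", True))
--         cur = []
--       else:
--         cur.append(ch)
--   if in_comment:
--     result.append(("".join(cur), False))
--   elif not fresh:
--     result.append(("".join(cur), True))
--   return result
-- ===== Notes on version B (the rewrite author's own statement) =====
-- stated objective: alternative
-- what changed: Replaced A's recursive partition-on-';' / split-on-'\n' token assembly by a single left-to-right character-level state machine (code/comment mode with a pending-token buffer and a fresh-after-comment-newline flag) that emits tokens as it scans.
import Mathlib
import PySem

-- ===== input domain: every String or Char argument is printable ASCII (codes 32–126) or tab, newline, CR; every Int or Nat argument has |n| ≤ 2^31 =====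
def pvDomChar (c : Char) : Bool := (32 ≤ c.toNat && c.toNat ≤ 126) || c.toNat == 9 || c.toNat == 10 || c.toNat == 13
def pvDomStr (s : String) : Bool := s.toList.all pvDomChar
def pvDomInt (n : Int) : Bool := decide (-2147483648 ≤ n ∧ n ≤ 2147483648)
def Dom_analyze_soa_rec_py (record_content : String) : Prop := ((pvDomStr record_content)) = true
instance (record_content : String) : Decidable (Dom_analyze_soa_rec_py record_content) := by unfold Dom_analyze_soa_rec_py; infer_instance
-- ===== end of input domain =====

-- B replaces A's partition/split recursion by a single character-level state-machine pass
-- (code/comment mode with a pending-token buffer); same O(n) cost (objective: alternative).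


-- str.partition with a single-char separator, hand-ported (PySem has no partition):
-- scan for the FIRST occurrence of c; returns (before, found?, after) — exact for a 1-char separator.
def pyPartitionChar (c : Char) : List Char → List Char × Bool × List Char
  | [] => ([], false, [])
  | x :: xs =>
    if x = c then ([], true, xs)
    else
      let r := pyPartitionChar c xs
      (x :: r.1, r.2.1, r.2.2)

-- termination helpers for port A: the post-comment remainder is strictly shorter
theorem pyPartitionChar_len_le (c : Char) (s : List Char) :
    (pyPartitionChar c s).2.2.length ≤ s.length := by
  induction s with
  | nil => simp [pyPartitionChar]
  | cons x xs ih =>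
    simp only [pyPartitionChar]
    split <;> simp <;> omega

theorem pyPartitionChar_len_lt (c : Char) (s : List Char)
    (h : (pyPartitionChar c s).2.1 = true) :
    (pyPartitionChar c s).2.2.length < s.length := by
  induction s with
  | nil => simp [pyPartitionChar] at h
  | cons x xs ih =>
    simp only [pyPartitionChar] at h ⊢
    split
    · simpa using Nat.lt_succ_of_le (Nat.le_refl _)
    · rename_i hne
      simp only [hne, if_neg] at h ⊢
      have := ih h
      simpa using Nat.lt_succ_of_lt this

-- ===== PORT A =====
-- literal transliteration of __analyze_soa_rec on List Char (counter-guarded line loop, tail recursion on the remainder)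
def analyzeRecA (content : List Char) : List (String × Bool) :=
  let p := pyPartitionChar ';' content
  let base := ((PySem.Chars.splitOn p.1 ['\n']).foldl
      (fun (acc : List (String × Bool) × Nat) line =>
        ((if acc.2 > 0 then acc.1 ++ [(("\n" : String), true)] else acc.1)
          ++ [(String.mk line, true)], acc.2 + 1)) ([], 0)).1
  if h : p.2.1 = true then
    let q := pyPartitionChar '\n' p.2.2
    ((base ++ [(String.mk (';' :: q.1), false)])
      ++ (if q.2.1 = true then [(("\n" : String), true)] else []))
      ++ (if q.2.2 ≠ [] then analyzeRecA q.2.2 else [])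
  else base
termination_by content.length
decreasing_by
  exact Nat.lt_of_le_of_lt (pyPartitionChar_len_le '\n' _) (pyPartitionChar_len_lt ';' _ h)

def analyze_soa_rec_py (record_content : String) : List (String × Bool) :=
  analyzeRecA record_content.toList

-- ===== PORT B =====
-- literal transliteration of B's state machine: one pass over the characters,
-- state = (result so far, pending chars, in_comment, fresh-after-comment-newline)
def stepB (st : List (String × Bool) × List Char × Bool × Bool) (c : Char) :
    List (String × Bool) × List Char × Bool × Bool :=
  match st with
  | (res, cur, inc, fresh) =>
    if inc then
      if c = '\n' then
        (res ++ [(String.mk cur, false), (("\n" : String), true)], [], false, true)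
      else (res, cur ++ [c], true, fresh)
    else
      if c = ';' then (res ++ [(String.mk cur, true)], [c], true, false)
      else if c = '\n' then
        (res ++ [(String.mk cur, true), (("\n" : String), true)], [], false, false)
      else (res, cur ++ [c], false, false)

def finB (st : List (String × Bool) × List Char × Bool × Bool) : List (String × Bool) :=
  match st with
  | (res, cur, inc, fresh) =>
    if inc then res ++ [(String.mk cur, false)]
    else if fresh then res
    else res ++ [(String.mk cur, true)]

def analyze_soa_rec_py_alt (record_content : String) : List (String × Bool) :=
  finB (record_content.toList.foldl stepB ([], [], false, false))

-- ===== PRECONDITION & SPEC =====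
def Spec_analyze_soa_rec_py (record_content : String) (out : List (String × Bool)) : Prop := out = analyze_soa_rec_py_alt record_content
instance (record_content : String) (out : List (String × Bool)) : Decidable (Spec_analyze_soa_rec_py record_content out) := by unfold Spec_analyze_soa_rec_py; infer_instance

-- ===== CLAIM (what is proved, stated in full; the proofs are below) =====
def Claim_equal_analyze_soa_rec_py : Prop := ∀ (record_content : String), Dom_analyze_soa_rec_py record_content → Spec_analyze_soa_rec_py record_content (analyze_soa_rec_py record_content)

-- ===== LEMMAS AND PROOFS =====

-- pyPartitionChar facts
theorem pyPartitionChar_not_mem (c : Char) (s : List Char) (h : c ∉ s) :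
    pyPartitionChar c s = (s, false, []) := by
  induction s with
  | nil => rfl
  | cons x xs ih =>
    simp only [List.mem_cons, not_or] at h
    have hx : ¬ x = c := fun hx => h.1 hx.symm
    simp [pyPartitionChar, hx, ih h.2]

theorem pyPartitionChar_append (c : Char) (pre l : List Char) (h : c ∉ pre) :
    pyPartitionChar c (pre ++ l)
      = (pre ++ (pyPartitionChar c l).1, (pyPartitionChar c l).2) := by
  induction pre with
  | nil => simp
  | cons x xs ih =>
    simp only [List.mem_cons, not_or] at h
    have hx : ¬ x = c := fun hx => h.1 hx.symm
    simp [pyPartitionChar, hx, ih h.2]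

-- splitOn.go facts (fuel-based helper of PySem.Chars.splitOn)
theorem go_zero (sep l cur : List Char) (acc : List (List Char)) :
    PySem.Chars.splitOn.go sep 0 l cur acc = ((cur.reverse ++ l) :: acc).reverse := by
  simp [PySem.Chars.splitOn.go]

theorem go_nil (sep : List Char) (f : Nat) (cur : List Char) (acc : List (List Char)) :
    PySem.Chars.splitOn.go sep (f+1) [] cur acc = (cur.reverse :: acc).reverse := by
  simp [PySem.Chars.splitOn.go]

theorem go_hit (f : Nat) (t cur : List Char) (acc : List (List Char)) :
    PySem.Chars.splitOn.go ['\n'] (f+1) ('\n' :: t) cur acc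
      = PySem.Chars.splitOn.go ['\n'] f t [] (cur.reverse :: acc) := by
  simp [PySem.Chars.splitOn.go, List.isPrefixOf]

theorem go_miss (f : Nat) (c : Char) (t cur : List Char) (acc : List (List Char)) (h : ¬ c = '\n') :
    PySem.Chars.splitOn.go ['\n'] (f+1) (c :: t) cur acc
      = PySem.Chars.splitOn.go ['\n'] f t (c :: cur) acc := by
  simp [PySem.Chars.splitOn.go, List.isPrefixOf, show ¬ '\n' = c from fun hh => h hh.symm]

theorem go_acc (fuel : Nat) : ∀ (l cur : List Char) (acc : List (List Char)),
    PySem.Chars.splitOn.go ['\n'] fuel l cur acc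
      = acc.reverse ++ PySem.Chars.splitOn.go ['\n'] fuel l cur [] := by
  induction fuel with
  | zero => intro l cur acc; simp [go_zero]
  | succ f ih =>
    intro l cur acc
    cases l with
    | nil => simp [go_nil]
    | cons c t =>
      by_cases hc : c = '\n'
      · subst hc
        rw [go_hit, go_hit, ih t [] (cur.reverse :: acc), ih t [] [cur.reverse]]
        simp
      · rw [go_miss _ _ _ _ _ hc, go_miss _ _ _ _ _ hc, ih t (c :: cur) acc]

theorem go_consume (pre : List Char) (hpre : '\n' ∉ pre) :
    ∀ (fuel : Nat) (l cur : List Char) (acc : List (List Char)), pre.length < fuel →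
    PySem.Chars.splitOn.go ['\n'] fuel (pre ++ l) cur acc
      = PySem.Chars.splitOn.go ['\n'] (fuel - pre.length) l (pre.reverse ++ cur) acc := by
  induction pre with
  | nil => intro fuel l cur acc _; simp
  | cons c pre' ih =>
    intro fuel l cur acc hf
    simp only [List.mem_cons, not_or] at hpre
    obtain ⟨f, rfl⟩ : ∃ f, fuel = f + 1 := ⟨fuel - 1, by omega⟩
    rw [List.cons_append, go_miss _ _ _ _ _ (fun hh => hpre.1 hh.symm),
        ih hpre.2 f l (c :: cur) acc (by simpa using Nat.lt_of_succ_lt_succ hf)]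
    simp only [List.length_cons, List.reverse_cons]
    congr 1
    · omega
    · simp

theorem splitOn_no_nl (cs : List Char) (h : '\n' ∉ cs) :
    PySem.Chars.splitOn cs ['\n'] = [cs] := by
  unfold PySem.Chars.splitOn
  rw [show cs = cs ++ [] by simp] at h ⊢
  rw [go_consume cs (by simpa using h) _ [] [] [] (by simp)]
  simp [go_nil]

theorem splitOn_cons_nl (pre t : List Char) (h : '\n' ∉ pre) :
    PySem.Chars.splitOn (pre ++ '\n' :: t) ['\n'] = pre :: PySem.Chars.splitOn t ['\n'] := by
  unfold PySem.Chars.splitOn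
  rw [go_consume pre h _ ('\n' :: t) [] [] (by simp)]
  have : (pre ++ '\n' :: t).length + 1 - pre.length = t.length + 2 := by simp; omega
  rw [this, go_hit, go_acc]
  simp

theorem go_ne_nil (fuel : Nat) : ∀ (l cur : List Char),
    PySem.Chars.splitOn.go ['\n'] fuel l cur [] ≠ [] := by
  induction fuel with
  | zero => intro l cur; simp [go_zero]
  | succ f ih =>
    intro l cur
    cases l with
    | nil => simp [go_nil]
    | cons c t =>
      by_cases hc : c = '\n'
      · subst hc
        rw [go_hit, go_acc]
        simp
      · rw [go_miss _ _ _ _ _ hc]; exact ih t (c :: cur)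

theorem splitOn_ne_nil (l : List Char) : PySem.Chars.splitOn l ['\n'] ≠ [] := by
  unfold PySem.Chars.splitOn
  exact go_ne_nil _ l []

-- A's counter-guarded fold, once the counter is positive, is an interleaving flatMap
theorem foldA_pos (lines : List (List Char)) (acc : List (String × Bool)) (n : Nat) (h : 0 < n) :
    (lines.foldl
      (fun (acc : List (String × Bool) × Nat) line =>
        ((if acc.2 > 0 then acc.1 ++ [(("\n" : String), true)] else acc.1)
          ++ [(String.mk line, true)], acc.2 + 1)) (acc, n)).1
    = acc ++ lines.flatMap (fun line => [(("\n" : String), true), (String.mk line, true)]) := by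
  induction lines generalizing acc n with
  | nil => simp
  | cons l ls ih =>
    simp only [List.foldl_cons, if_pos h]
    rw [ih _ (n + 1) (Nat.succ_pos n)]
    simp

theorem foldA_zero (l0 : List Char) (rest : List (List Char)) :
    (((l0 :: rest).foldl
      (fun (acc : List (String × Bool) × Nat) line =>
        ((if acc.2 > 0 then acc.1 ++ [(("\n" : String), true)] else acc.1)
          ++ [(String.mk line, true)], acc.2 + 1)) ([], 0)).1 : List (String × Bool))
    = [(String.mk l0, true)]
      ++ rest.flatMap (fun line => [(("\n" : String), true), (String.mk line, true)]) := by
  simp only [List.foldl_cons]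
  rw [foldA_pos rest _ 1 Nat.one_pos]
  simp

theorem pyPartitionChar_not_found (c : Char) (s : List Char)
    (h : (pyPartitionChar c s).2.1 = false) : (pyPartitionChar c s).2.2 = [] := by
  induction s with
  | nil => rfl
  | cons x xs ih =>
    simp only [pyPartitionChar] at h ⊢
    split at h
    · simp at h
    · rename_i hne
      simp only [pyPartitionChar, hne, if_neg] at h ⊢
      exact ih h

-- three decomposition lemmas for A's recursion
theorem analyzeRecA_pure (cur : List Char) (h1 : ';' ∉ cur) (h2 : '\n' ∉ cur) :
    analyzeRecA cur = [(String.mk cur, true)] := by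
  rw [analyzeRecA, pyPartitionChar_not_mem ';' cur h1]
  simp [splitOn_no_nl cur h2]

theorem analyzeRecA_nl (cur t : List Char) (h1 : ';' ∉ cur) (h2 : '\n' ∉ cur) :
    analyzeRecA (cur ++ '\n' :: t)
      = (String.mk cur, true) :: (("\n" : String), true) :: analyzeRecA t := by
  have hsemi : pyPartitionChar ';' (cur ++ '\n' :: t)
      = (cur ++ '\n' :: (pyPartitionChar ';' t).1, (pyPartitionChar ';' t).2) := by
    rw [pyPartitionChar_append ';' cur ('\n' :: t) h1]
    simp [pyPartitionChar]
  obtain ⟨l0, rest, hsp⟩ : ∃ l0 rest,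
      PySem.Chars.splitOn (pyPartitionChar ';' t).1 ['\n'] = l0 :: rest := by
    cases h : PySem.Chars.splitOn (pyPartitionChar ';' t).1 ['\n'] with
    | nil => exact absurd h (splitOn_ne_nil _)
    | cons a b => exact ⟨a, b, rfl⟩
  conv_lhs => rw [analyzeRecA]
  conv_rhs => rw [analyzeRecA]
  rw [hsemi]
  simp only [splitOn_cons_nl cur _ h2, hsp, foldA_zero, foldA_pos]
  by_cases hb : (pyPartitionChar ';' t).2.1 = true <;> simp [hb]

theorem analyzeRecA_semi (cur t : List Char) (h1 : ';' ∉ cur) (h2 : '\n' ∉ cur) :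
    analyzeRecA (cur ++ ';' :: t)
      = [(String.mk cur, true), (String.mk (';' :: (pyPartitionChar '\n' t).1), false)]
        ++ (if (pyPartitionChar '\n' t).2.1 = true then [(("\n" : String), true)] else [])
        ++ (if (pyPartitionChar '\n' t).2.2 ≠ [] then analyzeRecA (pyPartitionChar '\n' t).2.2 else []) := by
  have hsemi : pyPartitionChar ';' (cur ++ ';' :: t) = (cur, true, t) := by
    rw [pyPartitionChar_append ';' cur (';' :: t) h1]
    simp [pyPartitionChar]
  conv_lhs => rw [analyzeRecA]
  rw [hsemi]
  simp [splitOn_no_nl cur h2, foldA_zero cur []]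

-- the comment-mode result, used only to state the scan invariant
def commentRes (ccur s : List Char) : List (String × Bool) :=
  (String.mk (ccur ++ (pyPartitionChar '\n' s).1), false)
    :: (if (pyPartitionChar '\n' s).2.1 = true then
          (("\n" : String), true)
            :: (if (pyPartitionChar '\n' s).2.2 ≠ [] then analyzeRecA (pyPartitionChar '\n' s).2.2 else [])
        else [])

-- a code-mode step does not read the incoming fresh flag
theorem stepB_fresh (res : List (String × Bool)) (cur : List Char) (fr : Bool) (c : Char) :
    stepB (res, cur, false, fr) c = stepB (res, cur, false, false) c := by
  simp [stepB]

-- the central invariant: scanning from code mode / comment mode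
theorem scan_main (n : Nat) :
    (∀ s : List Char, s.length ≤ n → ∀ (res : List (String × Bool)) (cur : List Char),
        ';' ∉ cur → '\n' ∉ cur →
        finB (s.foldl stepB (res, cur, false, false)) = res ++ analyzeRecA (cur ++ s)) ∧
    (∀ s : List Char, s.length ≤ n → ∀ (res : List (String × Bool)) (ccur : List Char),
        '\n' ∉ ccur →
        finB (s.foldl stepB (res, ccur, true, false)) = res ++ commentRes ccur s) := by
  induction n with
  | zero =>
    constructor
    · intro s hs res cur h1 h2
      have hnil : s = [] := List.eq_nil_of_length_eq_zero (Nat.le_zero.mp hs)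
      subst hnil
      simp [finB, analyzeRecA_pure cur h1 h2]
    · intro s hs res ccur h2
      have hnil : s = [] := List.eq_nil_of_length_eq_zero (Nat.le_zero.mp hs)
      subst hnil
      simp [finB, commentRes, pyPartitionChar]
  | succ m ih =>
    constructor
    · intro s hs res cur h1 h2
      cases s with
      | nil => simp [finB, analyzeRecA_pure cur h1 h2]
      | cons c t =>
        have ht : t.length ≤ m := by simpa using hs
        by_cases hc1 : c = ';'
        · subst hc1
          rw [List.foldl_cons]
          have hstep : stepB (res, cur, false, false) ';'
              = (res ++ [(String.mk cur, true)], [';'], true, false) := by simp [stepB]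
          rw [hstep, ih.2 t ht _ [';'] (by simp)]
          rw [analyzeRecA_semi cur t h1 h2]
          simp only [commentRes]
          by_cases hnl : (pyPartitionChar '\n' t).2.1 = true
          · by_cases hr : (pyPartitionChar '\n' t).2.2 = [] <;> simp [hnl, hr]
          · have hr := pyPartitionChar_not_found '\n' t ((Bool.not_eq_true _).mp hnl)
            simp [hnl, hr]
        · by_cases hc2 : c = '\n'
          · subst hc2
            rw [List.foldl_cons]
            have hstep : stepB (res, cur, false, false) '\n'
                = (res ++ [(String.mk cur, true), (("\n" : String), true)], [], false, false) := by
              simp [stepB]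
            rw [hstep, ih.1 t ht _ [] (by simp) (by simp)]
            rw [analyzeRecA_nl cur t h1 h2]
            simp
          · rw [List.foldl_cons]
            have hstep : stepB (res, cur, false, false) c = (res, cur ++ [c], false, false) := by
              simp [stepB, hc1, hc2]
            rw [hstep, ih.1 t ht res (cur ++ [c])
              (by simp only [List.mem_append, List.mem_singleton, not_or]
                  exact ⟨h1, fun h => hc1 h.symm⟩)
              (by simp only [List.mem_append, List.mem_singleton, not_or]
                  exact ⟨h2, fun h => hc2 h.symm⟩)]
            simp
    · intro s hs res ccur h2
      cases s with
      | nil => simp [finB, commentRes, pyPartitionChar]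
      | cons c t =>
        have ht : t.length ≤ m := by simpa using hs
        by_cases hc : c = '\n'
        · subst hc
          rw [List.foldl_cons]
          have hstep : stepB (res, ccur, true, false) '\n'
              = (res ++ [(String.mk ccur, false), (("\n" : String), true)], [], false, true) := by
            simp [stepB]
          rw [hstep]
          cases t with
          | nil => simp [finB, commentRes, pyPartitionChar]
          | cons d t' =>
            rw [List.foldl_cons, stepB_fresh, ← List.foldl_cons]
            rw [ih.1 (d :: t') ht _ [] (by simp) (by simp)]
            simp [commentRes, pyPartitionChar]
        · rw [List.foldl_cons]
          have hstep : stepB (res, ccur, true, false) c = (res, ccur ++ [c], true, false) := by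
            simp [stepB, hc]
          rw [hstep, ih.2 t ht res (ccur ++ [c])
            (by simp only [List.mem_append, List.mem_singleton, not_or]
                exact ⟨h2, fun h => hc h.symm⟩)]
          simp [commentRes, pyPartitionChar, hc]

-- ===== VERDICT (by name: the statement is the Claim_ definition above) =====
theorem analyze_soa_rec_py_spec : Claim_equal_analyze_soa_rec_py := by
  intro s _
  unfold Spec_analyze_soa_rec_py analyze_soa_rec_py analyze_soa_rec_py_alt
  have h := (scan_main s.toList.length).1 s.toList (Nat.le_refl _) [] []
    (by simp) (by simp)
  simpa using h.symm
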